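-- pv_equiv track=rewrite | github.com/batamorphism/Coding | C++/AtCoder/temp.py | tilt_box
-- ===== SOURCE A (Python) =====
-- import copy
--
-- N = 10
--
-- def tilt_box(dir, box):
--     box_copy = copy.copy(box)
--
--     # 上に落ちてくるときの処理
--     if dir == 'F':
--         for i in range(N):  # 行
--             for j in range(N):  # 列
--                 # i,jにキャンディーがあれば飛ばす
--                 # なければ、下方向を参照し、一つでもあればこのマスに持ってくる（持ってきた元のマスは0になる）
--                 if sum(box_copy[i][j]) > 0 :
--                     pass
--                 else:
--                     for k in range(i+1, N):  # 行
--                         # i,jにcandyがなく、k,jにcandyがあった場合、このマスに持ってくる(kはiの下側)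
--                         if sum(box_copy[i][j]) > 0 :pass
--                         elif sum(box_copy[k][j]) >0 :
--                             box_copy[i][j] = box_copy[k][j]
--                             box_copy[k][j] = (0,0,0)  # immutable
--                             break
--     elif dir == 'L':
--         for i in range(N):
--             for j in range(N):
--                 # i,jにキャンディーがあれば飛ばす
--                 # なければ、右方向を参照し、一つでもあればこのマスに持ってくる（持ってきた元のマスは0になる）
--                 if sum(box_copy[i][j]) > 0 :
--                     pass
--                 else :
--                     for k in range(j+1, N):
--                         # i,jにcandyがなく、i,kにcandyがあった場合、このマスに持ってくる
--                         if sum(box_copy[i][j]) > 0 :pass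
--                         elif sum(box_copy[i][k]) == 1:
--                             box_copy[i][j] = copy.copy(box_copy[i][k])
--                             box_copy[i][k] = [0,0,0]
--                             break
--
--     elif dir == 'B':
--         for i in range(N-1,-1,-1):
--             # 下から順にみていきたい
--             for j in range(N):
--                 # i_,jにキャンディーがあれば飛ばす
--                 # なければ、上方向を参照し、一つでもあればこのマスに持ってくる（持ってきた元のマスは0になる）
--                 if sum(box_copy[i][j]) > 0 :
--                     pass
--                 else :
--                     for k in range(i-1,-1,-1):
--                         # i_,jにcandyがなく、k,jにcandyがあった場合、このマスに持ってくる(kはiより上)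
--                         if sum(box_copy[i][j]) > 0 :pass
--                         elif sum(box_copy[k][j]) == 1:
--                             box_copy[i][j] = copy.copy(box_copy[k][j])
--                             box_copy[k][j] = [0,0,0]
--                             break
--
--     elif dir == 'R':
--         for i in range(N):
--             for j in range(N-1,-1,-1):
--                 # i,j_にキャンディーがあれば飛ばす
--                 # なければ、左方向を参照し、一つでもあればこのマスに持ってくる（持ってきた元のマスは0になる）
--                 if sum(box_copy[i][j]) > 0 :
--                     pass
--                 else :
--                     for k in range(j-1,-1,-1):
--                         # N-i,jにcandyがなく、i+k,jにcandyがあった場合、このマスに持ってくる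
--                         if sum(box_copy[i][j]) > 0 :pass
--                         elif sum(box_copy[i][k]) == 1:
--                             box_copy[i][j] = copy.copy(box_copy[i][k])
--                             box_copy[i][k] = [0,0,0]
--                             break
--
--     return box_copy
--
-- box = [[[0,0,0] for i in range(N)] for j in range(N)]
-- ===== SOURCE B (Python) =====
-- import copy
--
-- N = 10
--
-- def tilt_box(dir, box):
--     # Equivalence is about the return value; like A, this mutates the rows of
--     # the caller's box in place (shallow copy of the outer list).
--     box_copy = copy.copy(box)
--     if dir not in ('F', 'L', 'B', 'R'):
--         return box_copy
--     if dir == 'F':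
--         movable = lambda c: sum(c) > 0
--         sent = (0, 0, 0)
--     else:
--         movable = lambda c: sum(c) == 1
--         sent = [0, 0, 0]
--     vertical = dir in ('F', 'B')
--     descending = dir in ('B', 'R')
--     ks = list(range(N - 1, -1, -1)) if descending else list(range(N))
--     for t in range(N):
--         coords = [(k, t) if vertical else (t, k) for k in ks]
--         line = [box_copy[i][j] for (i, j) in coords]
--         queue = [c for c in line if movable(c)]
--         out = []
--         for c in line:
--             if sum(c) > 0 and not movable(c):      # stuck: never moves
--                 out.append(c)
--             elif queue:                            # compact next candy here
--                 m = queue.pop(0)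
--                 out.append(m if dir == 'F' else copy.copy(m))
--             elif movable(c):                       # candy moved away
--                 out.append(sent)
--             else:                                  # empty slot stays as it was
--                 out.append(c)
--         for (i, j), v in zip(coords, out):
--             box_copy[i][j] = v
--     return box_copy
-- ===== Notes on version B (the rewrite author's own statement) =====
-- stated objective: simpler
-- what changed: Each direction's per-cell pull-scan with break (re-scanning the rest of the row/column for every empty cell) is replaced by one single-pass compaction per line: classify cells, queue the movable ones, and write them back into the non-stuck slots in scan order.
import Mathlib
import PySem

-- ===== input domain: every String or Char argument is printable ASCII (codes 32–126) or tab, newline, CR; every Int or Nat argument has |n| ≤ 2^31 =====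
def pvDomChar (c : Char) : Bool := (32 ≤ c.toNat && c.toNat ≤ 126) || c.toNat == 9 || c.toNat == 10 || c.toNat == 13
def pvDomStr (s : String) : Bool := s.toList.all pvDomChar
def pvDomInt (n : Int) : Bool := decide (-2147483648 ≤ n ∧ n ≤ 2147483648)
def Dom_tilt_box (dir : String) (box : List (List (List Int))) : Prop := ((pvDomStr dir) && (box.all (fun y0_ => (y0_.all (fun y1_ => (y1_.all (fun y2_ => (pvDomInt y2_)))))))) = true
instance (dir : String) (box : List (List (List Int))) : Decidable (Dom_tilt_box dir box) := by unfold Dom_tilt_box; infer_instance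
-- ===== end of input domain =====

-- B replaces A's quadratic pull-scan per cell by one single-pass compaction per
-- line (objective: simpler). Equivalence is about the RETURN value; both
-- Pythons mutate the rows of the caller's list in place (shallow copy).

-- ===== PORT A =====
-- cell read box_copy[i][j] (getD: Pre_ keeps indices in range) and write box_copy[i][j] = v
def pvCell (g : List (List (List Int))) (c : Nat × Nat) : List Int := (g.getD c.1 []).getD c.2 []
def pvSet (g : List (List (List Int))) (c : Nat × Nat) (v : List Int) : List (List (List Int)) :=
  g.set c.1 ((g.getD c.1 []).set c.2 v)

-- the inner `for k in range(...)` scan with its break; `copy.copy` of a cell and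
-- the tuple sentinel `(0,0,0)` are value-level identities under the type convention
def pvScanA (mov : List Int → Bool) (sent : List Int)
    (g : List (List (List Int))) (c : Nat × Nat) : List (Nat × Nat) → List (List (List Int))
  | [] => g
  | k :: ks =>
    if (pvCell g c).sum > 0 then pvScanA mov sent g c ks        -- `if sum(...) > 0: pass`
    else if mov (pvCell g k) then pvSet (pvSet g c (pvCell g k)) k sent   -- move and break
    else pvScanA mov sent g c ks

-- body for one (i, j): skip if occupied, else pull from the scan list
def pvStepA (mov : List Int → Bool) (sent : List Int)
    (g : List (List (List Int))) (c : Nat × Nat) (ks : List (Nat × Nat)) : List (List (List Int)) :=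
  if (pvCell g c).sum > 0 then g else pvScanA mov sent g c ks

-- the four pasted nested loops of A; range(a, N) = List.range' a (10-a),
-- range(a-1, -1, -1) = (List.range a).reverse; movable test is sum>0 for 'F', sum==1 otherwise
def tilt_box (dir : String) (box : List (List (List Int))) : List (List (List Int)) :=
  if dir = "F" then
    (List.range 10).foldl (fun g i =>
      (List.range 10).foldl (fun g j =>
        pvStepA (fun c => decide (0 < c.sum)) [0,0,0] g (i, j)
          ((List.range' (i+1) (10-(i+1))).map (fun k => (k, j)))) g) box
  else if dir = "L" then
    (List.range 10).foldl (fun g i =>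
      (List.range 10).foldl (fun g j =>
        pvStepA (fun c => decide (c.sum = 1)) [0,0,0] g (i, j)
          ((List.range' (j+1) (10-(j+1))).map (fun k => (i, k)))) g) box
  else if dir = "B" then
    ((List.range 10).reverse).foldl (fun g i =>
      (List.range 10).foldl (fun g j =>
        pvStepA (fun c => decide (c.sum = 1)) [0,0,0] g (i, j)
          (((List.range i).reverse).map (fun k => (k, j)))) g) box
  else if dir = "R" then
    (List.range 10).foldl (fun g i =>
      ((List.range 10).reverse).foldl (fun g j =>
        pvStepA (fun c => decide (c.sum = 1)) [0,0,0] g (i, j)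
          (((List.range j).reverse).map (fun k => (i, k)))) g) box
  else box

-- ===== PORT B =====
-- single pass over one line: stuck cells stay, other slots take the queued
-- movable candies in order; once the queue is empty a moved-away candy leaves
-- the sentinel and an originally empty slot keeps its value
def pvFill (mov : List Int → Bool) (sent : List Int) :
    List (List Int) → List (List Int) → List (List Int)
  | _, [] => []
  | q, c :: rest =>
    if c.sum > 0 && !(mov c) then c :: pvFill mov sent q rest
    else match q with
      | m :: q' => m :: pvFill mov sent q' rest
      | [] => (if mov c then sent else c) :: pvFill mov sent [] rest

-- coordinates of line t in scan order
def pvLineCoords (vertical descending : Bool) (t : Nat) : List (Nat × Nat) :=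
  (if descending then (List.range 10).reverse else List.range 10).map
    (fun k => if vertical then (k, t) else (t, k))

-- write the computed line back:  for (i,j),v in zip(coords,out): box_copy[i][j] = v
def pvWriteCells (g : List (List (List Int))) (ps : List ((Nat × Nat) × List Int)) :
    List (List (List Int)) :=
  ps.foldl (fun g p => pvSet g p.1 p.2) g

def tilt_box_alt (dir : String) (box : List (List (List Int))) : List (List (List Int)) :=
  if dir = "F" ∨ dir = "L" ∨ dir = "B" ∨ dir = "R" then
    let mov : List Int → Bool := if dir = "F" then (fun c => decide (0 < c.sum)) else (fun c => decide (c.sum = 1))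
    let vertical := dir = "F" ∨ dir = "B"
    let descending := dir = "B" ∨ dir = "R"
    (List.range 10).foldl (fun g t =>
      let coords := pvLineCoords vertical descending t
      let line := coords.map (pvCell g)
      let q := line.filter mov
      pvWriteCells g (coords.zip (pvFill mov [0,0,0] q line))) box
  else box

-- ===== PRECONDITION & SPEC =====
-- Pre_ excludes exactly the inputs where A raises IndexError: a tilt direction
-- with fewer than 10 rows or a row among the first 10 shorter than 10 cells.
def Pre_tilt_box (dir : String) (box : List (List (List Int))) : Prop :=
  (dir = "F" ∨ dir = "L" ∨ dir = "B" ∨ dir = "R") →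
    (10 ≤ box.length ∧ ∀ r ∈ box.take 10, 10 ≤ r.length)
instance (dir : String) (box : List (List (List Int))) : Decidable (Pre_tilt_box dir box) := by
  unfold Pre_tilt_box; infer_instance
def pvWitness_tilt_box : String × List (List (List Int)) :=
  ("L", List.replicate 10 (List.replicate 10 ([1,0,0] : List Int)))

def Spec_tilt_box (dir : String) (box : List (List (List Int))) (out : List (List (List Int))) : Prop := out = tilt_box_alt dir box
instance (dir : String) (box : List (List (List Int))) (out : List (List (List Int))) : Decidable (Spec_tilt_box dir box out) := by unfold Spec_tilt_box; infer_instance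

-- ===== CLAIM (what is proved, stated in full; the proofs are below) =====
def Claim_equal_tilt_box : Prop := ∀ (dir : String) (box : List (List (List Int))), Dom_tilt_box dir box → Pre_tilt_box dir box → Spec_tilt_box dir box (tilt_box dir box)

-- ===== LEMMAS AND PROOFS =====

-- ---------- generic list getD/set lemmas ----------
theorem pvGetD_set_ne {α : Type} (l : List α) (n m : Nat) (v d : α) (h : m ≠ n) :
    (l.set n v).getD m d = l.getD m d := by
  rw [List.getD_eq_getElem?_getD, List.getElem?_set_ne (Ne.symm h), ← List.getD_eq_getElem?_getD]

theorem pvGetD_set_self {α : Type} (l : List α) (n : Nat) (v d : α) (h : n < l.length) :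
    (l.set n v).getD n d = v := by
  rw [List.getD_eq_getElem?_getD, List.getElem?_set_self (by omega)]; rfl

theorem pvGetD_set_self_oob {α : Type} (l : List α) (n : Nat) (v d : α) (h : l.length ≤ n) :
    (l.set n v).getD n d = l.getD n d := by
  rw [List.set_eq_of_length_le h]

theorem pvSet_getD_self {α : Type} (l : List α) (n : Nat) (d : α) :
    l.set n (l.getD n d) = l := by
  rcases Nat.lt_or_ge n l.length with h | h
  · rw [List.getD_eq_getElem?_getD, List.getElem?_eq_getElem h]
    simp [List.set_getElem_self]
  · exact List.set_eq_of_length_le h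

theorem pvLength_getD_set {α : Type} (l : List (List α)) (n i : Nat) (v : List α) :
    ((l.set n v).getD i []).length = (if i = n ∧ n < l.length then v.length else ((l.getD i []).length)) := by
  by_cases hi : i = n
  · subst hi
    rcases Nat.lt_or_ge i l.length with h | h
    · rw [pvGetD_set_self _ _ _ _ h]; simp [h]
    · rw [pvGetD_set_self_oob _ _ _ _ h]; simp; omega
  · rw [pvGetD_set_ne _ _ _ _ _ hi]; simp [hi]

-- ---------- pvCell / pvSet lemmas ----------
theorem pvCell_set_ne (g : List (List (List Int))) (c c' : Nat × Nat) (v : List Int)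
    (h : c' ≠ c) : pvCell (pvSet g c v) c' = pvCell g c' := by
  obtain ⟨i, j⟩ := c; obtain ⟨i', j'⟩ := c'
  by_cases hi : i' = i
  · subst hi
    have hj : j' ≠ j := by simpa [Prod.ext_iff] using h
    unfold pvCell pvSet
    rcases Nat.lt_or_ge i' g.length with hlen | hlen
    · rw [pvGetD_set_self _ _ _ _ hlen, pvGetD_set_ne _ _ _ _ _ hj]
    · rw [pvGetD_set_self_oob _ _ _ _ hlen]
  · unfold pvCell pvSet
    rw [pvGetD_set_ne _ _ _ _ _ hi]

theorem pvCell_set_self (g : List (List (List Int))) (c : Nat × Nat) (v : List Int)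
    (h1 : c.1 < g.length) (h2 : c.2 < (g.getD c.1 []).length) :
    pvCell (pvSet g c v) c = v := by
  obtain ⟨i, j⟩ := c
  unfold pvCell pvSet
  rw [pvGetD_set_self _ _ _ _ h1, pvGetD_set_self _ _ _ _ h2]

theorem pvSet_cell_self (g : List (List (List Int))) (c : Nat × Nat) :
    pvSet g c (pvCell g c) = g := by
  obtain ⟨i, j⟩ := c
  unfold pvCell pvSet
  rw [pvSet_getD_self, pvSet_getD_self]

theorem pvSet_set_same (g : List (List (List Int))) (c : Nat × Nat) (v w : List Int) :
    pvSet (pvSet g c v) c w = pvSet g c w := by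
  obtain ⟨i, j⟩ := c
  unfold pvSet
  rcases Nat.lt_or_ge i g.length with hlen | hlen
  · rw [pvGetD_set_self _ _ _ _ hlen, List.set_set, List.set_set]
  · rw [pvGetD_set_self_oob _ _ _ _ hlen, List.set_set]

theorem pvSet_comm (g : List (List (List Int))) (c c' : Nat × Nat) (v w : List Int)
    (h : c ≠ c') : pvSet (pvSet g c v) c' w = pvSet (pvSet g c' w) c v := by
  obtain ⟨i, j⟩ := c; obtain ⟨i', j'⟩ := c'
  by_cases hi : i = i'
  · subst hi
    have hj : j ≠ j' := by simpa [Prod.ext_iff] using h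
    unfold pvSet
    rcases Nat.lt_or_ge i g.length with hlen | hlen
    · rw [pvGetD_set_self _ _ _ _ hlen, pvGetD_set_self _ _ _ _ hlen,
        List.set_set, List.set_set, List.set_comm _ _ hj]
    · rw [pvGetD_set_self_oob _ _ _ _ hlen, pvGetD_set_self_oob _ _ _ _ hlen,
        List.set_set, List.set_set, List.set_eq_of_length_le hlen, List.set_eq_of_length_le hlen]
  · unfold pvSet
    rw [pvGetD_set_ne _ _ _ _ _ (Ne.symm hi), pvGetD_set_ne _ _ _ _ _ hi,
      List.set_comm _ _ hi]

theorem length_pvSet (g : List (List (List Int))) (c : Nat × Nat) (v : List Int) :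
    (pvSet g c v).length = g.length := by simp [pvSet]

theorem row_pvSet_length (g : List (List (List Int))) (c : Nat × Nat) (v : List Int) (i : Nat) :
    ((pvSet g c v).getD i []).length = (g.getD i []).length := by
  obtain ⟨i0, j0⟩ := c
  unfold pvSet
  rw [pvLength_getD_set]
  split
  · next hc =>
    obtain ⟨h1, h2⟩ := hc
    subst h1
    simp
  · rfl

def pvValid (g : List (List (List Int))) : Prop :=
  10 ≤ g.length ∧ ∀ i < 10, 10 ≤ (g.getD i []).length

theorem pvValid_pvSet (g : List (List (List Int))) (c : Nat × Nat) (v : List Int)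
    (h : pvValid g) : pvValid (pvSet g c v) := by
  obtain ⟨h1, h2⟩ := h
  exact ⟨by rw [length_pvSet]; exact h1, fun i hi => by rw [row_pvSet_length]; exact h2 i hi⟩

-- ---------- A's pull on one line, as a value-level algorithm ----------
def pvSearch (mov : List Int → Bool) (sent : List Int) :
    List (List Int) → Option (List Int × List (List Int))
  | [] => none
  | c :: rest =>
    if mov c then some (c, sent :: rest)
    else match pvSearch mov sent rest with
      | some (x, rest') => some (x, c :: rest')
      | none => none

theorem pvSearch_length (mov : List Int → Bool) (sent : List Int) :
    ∀ (l : List (List Int)) (x : List Int) (l' : List (List Int)),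
      pvSearch mov sent l = some (x, l') → l'.length = l.length := by
  intro l
  induction l with
  | nil => intro x l' h; simp [pvSearch] at h
  | cons c rest ih =>
    intro x l' h
    by_cases hc : mov c
    · simp [pvSearch, hc] at h
      obtain ⟨h1, h2⟩ := h
      subst h2; simp
    · simp [pvSearch, hc] at h
      rcases hs : pvSearch mov sent rest with _ | ⟨y, rest'⟩
      · rw [hs] at h; simp at h
      · rw [hs] at h; simp at h
        obtain ⟨h1, h2⟩ := h
        subst h2
        simpa using ih y rest' hs

def pvProc (mov : List Int → Bool) (sent : List Int) : List (List Int) → List (List Int)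
  | [] => []
  | c :: rest =>
    if 0 < c.sum then c :: pvProc mov sent rest
    else match h : pvSearch mov sent rest with
      | none => c :: pvProc mov sent rest
      | some (x, rest') => x :: pvProc mov sent rest'
termination_by l => l.length
decreasing_by
  · simp
  · simp
  · have := pvSearch_length mov sent rest x rest' h
    simp [this]

theorem pvProc_length (mov : List Int → Bool) (sent : List Int) :
    ∀ (n : Nat) (l : List (List Int)), l.length ≤ n → (pvProc mov sent l).length = l.length := by
  intro n
  induction n with
  | zero => intro l h; have : l = [] := List.eq_nil_of_length_eq_zero (by omega); subst this; simp [pvProc]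
  | succ n ih =>
    intro l h
    match l with
    | [] => simp [pvProc]
    | c :: rest =>
      rw [pvProc]
      split
      · simpa using ih rest (by simpa using Nat.le_of_succ_le_succ h)
      · split
        · simpa using ih rest (by simpa using Nat.le_of_succ_le_succ h)
        · next x rest' hs =>
          have hlen := pvSearch_length mov sent rest x rest' hs
          simp [ih rest' (by simp at h ⊢; omega)]
          omega

theorem pvSearch_eq_none (mov : List Int → Bool) (sent : List Int) :
    ∀ (l : List (List Int)), pvSearch mov sent l = none → ∀ c ∈ l, mov c = false := by
  intro l
  induction l with
  | nil => intro _ c hc; simp at hc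
  | cons c rest ih =>
    intro h c' hc'
    by_cases hc : mov c
    · simp [pvSearch, hc] at h
    · simp [pvSearch, hc] at h
      rcases hs : pvSearch mov sent rest with _ | ⟨y, rest'⟩
      · rcases List.mem_cons.1 hc' with h1 | h1
        · subst h1; simpa using hc
        · exact ih hs c' h1
      · rw [hs] at h; simp at h

theorem pvSearch_append_found (mov : List Int → Bool) (sent : List Int) (x : List Int)
    (hx : mov x = true) :
    ∀ (l1 l2 : List (List Int)), (∀ c ∈ l1, mov c = false) →
      pvSearch mov sent (l1 ++ x :: l2) = some (x, l1 ++ sent :: l2) := by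
  intro l1
  induction l1 with
  | nil => intro l2 _; simp [pvSearch, hx]
  | cons c rest ih =>
    intro l2 hall
    have hc : mov c = false := hall c (by simp)
    simp only [List.cons_append, pvSearch, hc, Bool.false_eq_true, if_false]
    rw [ih l2 (fun c' hc' => hall c' (by simp [hc']))]

theorem pvSearch_some_split (mov : List Int → Bool) (sent : List Int) :
    ∀ (l : List (List Int)) (x : List Int) (l' : List (List Int)),
      pvSearch mov sent l = some (x, l') →
      ∃ l1 l2, l = l1 ++ x :: l2 ∧ l' = l1 ++ sent :: l2 ∧
        (∀ c ∈ l1, mov c = false) ∧ mov x = true := by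
  intro l
  induction l with
  | nil => intro x l' h; simp [pvSearch] at h
  | cons c rest ih =>
    intro x l' h
    by_cases hc : mov c
    · simp [pvSearch, hc] at h
      obtain ⟨h1, h2⟩ := h
      exact ⟨[], rest, by rw [h1]; simp, by rw [h2]; simp, by simp, h1 ▸ hc⟩
    · simp [pvSearch, hc] at h
      rcases hs : pvSearch mov sent rest with _ | ⟨y, rest2⟩
      · rw [hs] at h; simp at h
      · rw [hs] at h; simp at h
        obtain ⟨h1, h2⟩ := h
        subst h1; subst h2
        obtain ⟨l1, l2, e1, e2, hall, hy⟩ := ih y rest2 hs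
        exact ⟨c :: l1, l2, by simp [e1], by simp [e2], by
          intro c' hc'
          rcases List.mem_cons.1 hc' with h3 | h3
          · subst h3; simpa using hc
          · exact hall c' h3, hy⟩

-- B's single-pass fill: replacing a movable cell by the sentinel does not change it
theorem pvFill_replace (mov : List Int → Bool) (sent : List Int) (x : List Int)
    (hm : ∀ c, mov c = true → 0 < c.sum) (hs : sent.sum ≤ 0) (hms : mov sent = false)
    (hx : mov x = true) :
    ∀ (l1 : List (List Int)) (q l2 : List (List Int)),
      pvFill mov sent q (l1 ++ x :: l2) = pvFill mov sent q (l1 ++ sent :: l2) := by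
  intro l1
  induction l1 with
  | nil =>
    intro q l2
    have hxs : 0 < x.sum := hm x hx
    have hns : ¬ (0 < sent.sum) := by omega
    match q with
    | m :: q' => simp [pvFill, hx, hms, hxs, hns]
    | [] => simp [pvFill, hx, hms, hxs, hns]
  | cons c rest ih =>
    intro q l2
    simp only [List.cons_append, pvFill]
    split
    · rw [ih]
    · match q with
      | m :: q' => simp only [ih]
      | [] => simp only [ih]

-- the heart: A's repeated pull-scan over one line equals B's single-pass compaction
theorem pvProc_eq_fill (mov : List Int → Bool) (sent : List Int)
    (hm : ∀ c, mov c = true → 0 < c.sum) (hs : sent.sum ≤ 0) (hms : mov sent = false) :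
    ∀ (n : Nat) (l : List (List Int)), l.length ≤ n →
      pvProc mov sent l = pvFill mov sent (l.filter mov) l := by
  intro n
  induction n with
  | zero =>
    intro l h
    have : l = [] := List.eq_nil_of_length_eq_zero (by omega)
    subst this; simp [pvProc, pvFill]
  | succ n ih =>
    intro l h
    match l with
    | [] => simp [pvProc, pvFill]
    | c :: rest =>
      have hrest : rest.length ≤ n := by simpa using Nat.le_of_succ_le_succ h
      rw [pvProc]
      by_cases hcs : 0 < c.sum
      · rw [if_pos hcs]
        by_cases hc : mov c
        · -- movable (or for F any occupied) head consumes the queue head, itself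
          simp only [List.filter_cons, hc, if_true, pvFill, hcs, decide_true, Bool.true_and,
            Bool.not_eq_eq_eq_not, Bool.not_true]
          simp [hc, ih rest hrest]
        · -- stuck head stays
          simp only [List.filter_cons, hc, Bool.false_eq_true, if_false, pvFill]
          rw [if_pos (by simp [hcs, hc])]
          rw [ih rest hrest]
      · rw [if_neg hcs]
        have hcm : mov c = false := by
          by_cases h' : mov c
          · exact absurd (hm c h') hcs
          · simpa using h'
        split
        · next hsearch =>
          -- no movable cell to the right: the empty slot keeps its value
          have hall : ∀ c' ∈ rest, mov c' = false := pvSearch_eq_none mov sent rest hsearch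
          have hfil : rest.filter mov = [] := List.filter_eq_nil_iff.2 (fun c' hc' => by simp [hall c' hc'])
          simp only [List.filter_cons, hcm, Bool.false_eq_true, if_false, hfil, pvFill]
          rw [ih rest hrest, hfil]
          split <;> rfl
        · next x rest' hsearch =>
          -- the first movable cell x is pulled here
          obtain ⟨l1, l2, e1, e2, hall1, hx⟩ := pvSearch_some_split mov sent rest x rest' hsearch
          have hlen' : rest'.length ≤ n := by
            rw [pvSearch_length mov sent rest x rest' hsearch]; exact hrest
          have hfil1 : l1.filter mov = [] := List.filter_eq_nil_iff.2 (fun c' hc' => by simp [hall1 c' hc'])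
          have hfilrest : rest.filter mov = x :: l2.filter mov := by
            rw [e1, List.filter_append, hfil1, List.filter_cons, if_pos hx, List.nil_append]
          have hfilrest' : rest'.filter mov = l2.filter mov := by
            rw [e2, List.filter_append, hfil1, List.filter_cons, hms]
            simp
          have lhs : pvProc mov sent rest' = pvFill mov sent (l2.filter mov) rest := by
            rw [ih rest' hlen', hfilrest', e2,
              ← pvFill_replace mov sent x hm hs hms hx l1 (l2.filter mov) l2, ← e1]
          rw [lhs]
          have hqc : (c :: rest).filter mov = x :: l2.filter mov := by
            rw [List.filter_cons, hcm]
            simpa using hfilrest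
          rw [hqc, pvFill]
          rw [if_neg (by simp [hcs])]

-- ---------- grid-level processing of one line ----------
def pvLineStep (mov : List Int → Bool) (sent : List Int)
    (g : List (List (List Int))) : List (Nat × Nat) → List (List (List Int))
  | [] => g
  | c :: rest => pvLineStep mov sent (pvStepA mov sent g c rest) rest

theorem pvLineStep_valid (mov : List Int → Bool) (sent : List Int) :
    ∀ (cs : List (Nat × Nat)) (g : List (List (List Int))), pvValid g →
      pvValid (pvLineStep mov sent g cs) := by
  have hscan : ∀ (ks : List (Nat × Nat)) (g : List (List (List Int))) (c : Nat × Nat),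
      pvValid g → pvValid (pvScanA mov sent g c ks) := by
    intro ks
    induction ks with
    | nil => intro g c hg; exact hg
    | cons k ks ih =>
      intro g c hg
      rw [pvScanA]
      split
      · exact ih g c hg
      · split
        · exact pvValid_pvSet _ _ _ (pvValid_pvSet _ _ _ hg)
        · exact ih g c hg
  intro cs
  induction cs with
  | nil => intro g hg; exact hg
  | cons c rest ih =>
    intro g hg
    rw [pvLineStep]
    apply ih
    rw [pvStepA]
    split
    · exact hg
    · exact hscan rest g c hg

theorem pvScanA_none (mov : List Int → Bool) (sent : List Int)
    (g : List (List (List Int))) (c : Nat × Nat) (h0 : (pvCell g c).sum ≤ 0) :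
    ∀ (ks : List (Nat × Nat)), (∀ k ∈ ks, mov (pvCell g k) = false) →
      pvScanA mov sent g c ks = g := by
  intro ks
  induction ks with
  | nil => intro _; rfl
  | cons k ks ih =>
    intro hall
    rw [pvScanA, if_neg (by omega), if_neg (by simp [hall k (by simp)])]
    exact ih (fun k' hk' => hall k' (by simp [hk']))

theorem pvScanA_found (mov : List Int → Bool) (sent : List Int)
    (g : List (List (List Int))) (c k : Nat × Nat) (ks2 : List (Nat × Nat))
    (h0 : (pvCell g c).sum ≤ 0) (hk : mov (pvCell g k) = true) :
    ∀ (ks1 : List (Nat × Nat)), (∀ k' ∈ ks1, mov (pvCell g k') = false) →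
      pvScanA mov sent g c (ks1 ++ k :: ks2) = pvSet (pvSet g c (pvCell g k)) k sent := by
  intro ks1
  induction ks1 with
  | nil => intro _; rw [List.nil_append, pvScanA, if_neg (by omega), if_pos hk]
  | cons k' ks1 ih =>
    intro hall
    rw [List.cons_append, pvScanA, if_neg (by omega), if_neg (by simp [hall k' (by simp)])]
    exact ih (fun k'' hk'' => hall k'' (by simp [hk'']))

-- a write at a coordinate that the zip overwrites anyway can be dropped
theorem pvWriteCells_set_mem (mov : List Int → Bool) :
    ∀ (cs : List (Nat × Nat)) (vs : List (List Int)) (g : List (List (List Int)))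
      (k : Nat × Nat) (w : List Int), k ∈ cs → vs.length = cs.length →
      pvWriteCells (pvSet g k w) (cs.zip vs) = pvWriteCells g (cs.zip vs) := by
  intro cs
  induction cs with
  | nil => intro vs g k w hk _; simp at hk
  | cons c cs ih =>
    intro vs g k w hk hlen
    match vs with
    | [] => simp at hlen
    | v :: vs =>
      by_cases hck : c = k
      · subst hck
        simp only [List.zip_cons_cons, pvWriteCells, List.foldl_cons]
        rw [pvSet_set_same]
      · have hk' : k ∈ cs := by
          rcases List.mem_cons.1 hk with h | h
          · exact absurd h.symm hck
          · exact h
        simp only [List.zip_cons_cons, pvWriteCells, List.foldl_cons]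
        rw [pvSet_comm g k c w v (fun h => hck h.symm)]
        exact ih vs (pvSet g c v) k w hk' (by simpa using hlen)

theorem pvSplitFirst {α : Type} (p : α → Bool) :
    ∀ (l : List α), (∀ a ∈ l, p a = false) ∨
      ∃ l1 a l2, l = l1 ++ a :: l2 ∧ (∀ b ∈ l1, p b = false) ∧ p a = true := by
  intro l
  induction l with
  | nil => exact Or.inl (by simp)
  | cons d rest2 ih2 =>
    by_cases hd : p d
    · exact Or.inr ⟨[], d, rest2, by simp, by simp, hd⟩
    · rcases ih2 with h1 | ⟨ks1, k, ks2, e1, e2, e3⟩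
      · refine Or.inl ?_
        intro k' hk'
        rcases List.mem_cons.1 hk' with h2 | h2
        · subst h2; simpa using hd
        · exact h1 k' h2
      · refine Or.inr ⟨d :: ks1, k, ks2, by simp [e1], ?_, e3⟩
        intro k' hk'
        rcases List.mem_cons.1 hk' with h2 | h2
        · subst h2; simpa using hd
        · exact e2 k' h2

-- line processing on the grid = extract the line, run the value algorithm, write it back
theorem pvLineStep_eq (mov : List Int → Bool) (sent : List Int) :
    ∀ (cs : List (Nat × Nat)) (g : List (List (List Int))), pvValid g → cs.Nodup →
      (∀ c ∈ cs, c.1 < 10 ∧ c.2 < 10) →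
      pvLineStep mov sent g cs =
        pvWriteCells g (cs.zip (pvProc mov sent (cs.map (pvCell g)))) := by
  intro cs
  induction cs with
  | nil => intro g _ _ _; rfl
  | cons c rest ih =>
    intro g hg hnd hbnd
    have hcrest : c ∉ rest := (List.nodup_cons.1 hnd).1
    have hndrest : rest.Nodup := (List.nodup_cons.1 hnd).2
    have hbrest : ∀ c' ∈ rest, c'.1 < 10 ∧ c'.2 < 10 := fun c' hc' => hbnd c' (by simp [hc'])
    rw [pvLineStep, List.map_cons, pvProc]
    by_cases hcs : 0 < (pvCell g c).sum
    · rw [if_pos hcs]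
      have hstep : pvStepA mov sent g c rest = g := by rw [pvStepA, if_pos (by omega)]
      rw [hstep, ih g hg hndrest hbrest]
      simp only [List.zip_cons_cons, pvWriteCells, List.foldl_cons]
      rw [pvSet_cell_self]
    · rw [if_neg hcs]
      have hstep : pvStepA mov sent g c rest = pvScanA mov sent g c rest := by
        rw [pvStepA, if_neg (by omega)]
      rcases pvSplitFirst (fun k => mov (pvCell g k)) rest
        with hnone | ⟨ks1, k, ks2, e1, e2, e3⟩
      · -- nothing movable: grid unchanged, line value algorithm finds none
        have hsearch : pvSearch mov sent (rest.map (pvCell g)) = none := by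
          rcases hres : pvSearch mov sent (rest.map (pvCell g)) with _ | ⟨x, rest'⟩
          · rfl
          · obtain ⟨l1, l2, f1, _, _, hx⟩ := pvSearch_some_split mov sent _ x rest' hres
            exfalso
            have : x ∈ rest.map (pvCell g) := by rw [f1]; simp
            obtain ⟨k', hk', hxk⟩ := List.mem_map.1 this
            rw [← hxk] at hx
            rw [hnone k' hk'] at hx
            simp at hx
        rw [hsearch]
        rw [hstep, pvScanA_none mov sent g c (by omega) rest hnone, ih g hg hndrest hbrest]
        simp only [List.zip_cons_cons, pvWriteCells, List.foldl_cons]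
        rw [pvSet_cell_self]
      · -- first movable cell at coordinate k: A pulls it here, the value algorithm finds it
        subst e1
        set x := pvCell g k with hxdef
        have hnd1 := List.nodup_append.1 hndrest
        have hkks1 : k ∉ ks1 := fun hm => (hnd1.2.2 k hm k (by simp)) rfl
        have hkks2 : k ∉ ks2 := ((List.nodup_cons.1 hnd1.2.1).1)
        have hkmem : k ∈ ks1 ++ k :: ks2 := by simp
        have hkbnd := hbrest k hkmem
        have hcbnd := hbnd c (by simp)
        have hck : c ≠ k := fun h => hcrest (h ▸ hkmem)
        have hg2v : pvValid (pvSet g c x) := pvValid_pvSet _ _ _ hg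
        set g2 : List (List (List Int)) := pvSet (pvSet g c x) k sent with hg2def
        have hg2valid : pvValid g2 := pvValid_pvSet _ _ _ hg2v
        -- cells of the rest of the line after the move
        have hcell_ne : ∀ k' : Nat × Nat, k' ≠ k → k' ≠ c → pvCell g2 k' = pvCell g k' := by
          intro k' h1 h2
          rw [hg2def, pvCell_set_ne _ _ _ _ h1, pvCell_set_ne _ _ _ _ h2]
        have hcell_k : pvCell g2 k = sent := by
          rw [hg2def]
          apply pvCell_set_self
          · rw [length_pvSet]; exact lt_of_lt_of_le hkbnd.1 hg.1
          · rw [row_pvSet_length]; exact lt_of_lt_of_le hkbnd.2 (hg.2 k.1 hkbnd.1)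
        have hmap : (ks1 ++ k :: ks2).map (pvCell g2) =
            ks1.map (pvCell g) ++ sent :: ks2.map (pvCell g) := by
          rw [List.map_append, List.map_cons, hcell_k]
          congr 1
          · exact List.map_congr_left (fun k' hk' => hcell_ne k' (fun h => hkks1 (h ▸ hk'))
              (fun h => hcrest (h ▸ (by simp [hk'] : k' ∈ ks1 ++ k :: ks2))))
          · congr 1
            exact List.map_congr_left (fun k' hk' => hcell_ne k' (fun h => hkks2 (h ▸ hk'))
              (fun h => hcrest (h ▸ (by simp [hk'] : k' ∈ ks1 ++ k :: ks2))))
        have hsearch : pvSearch mov sent ((ks1 ++ k :: ks2).map (pvCell g)) =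
            some (x, (ks1 ++ k :: ks2).map (pvCell g2)) := by
          rw [List.map_append, List.map_cons, hmap]
          exact pvSearch_append_found mov sent x e3 _ _
            (fun v hv => by obtain ⟨k', hk', rfl⟩ := List.mem_map.1 hv; exact e2 k' hk')
        rw [hsearch]
        have hscan : pvStepA mov sent g c (ks1 ++ k :: ks2) = g2 := by
          rw [hstep]
          exact pvScanA_found mov sent g c k ks2 (by omega) e3 ks1 e2
        rw [hscan, ih g2 hg2valid hndrest hbrest]
        have hlenout : (pvProc mov sent ((ks1 ++ k :: ks2).map (pvCell g2))).length =
            (ks1 ++ k :: ks2).length := by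
          rw [pvProc_length mov sent _ _ (le_refl _), List.length_map]
        simp only [List.zip_cons_cons, pvWriteCells, List.foldl_cons]
        rw [hg2def]
        exact pvWriteCells_set_mem mov _ _ _ k sent hkmem hlenout


-- ---------- grid extensionality ----------
theorem pvGrid_ext (g1 g2 : List (List (List Int))) (hlen : g1.length = g2.length)
    (hrow : ∀ i, (g1.getD i []).length = (g2.getD i []).length)
    (hcell : ∀ i j, pvCell g1 (i, j) = pvCell g2 (i, j)) : g1 = g2 := by
  apply List.ext_getElem?
  intro n
  rcases Nat.lt_or_ge n g1.length with h | h
  · have h2 : n < g2.length := by omega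
    rw [List.getElem?_eq_getElem h, List.getElem?_eq_getElem h2]
    congr 1
    apply List.ext_getElem?
    intro m
    have e1 : g1.getD n [] = g1[n] := by rw [List.getD_eq_getElem?_getD, List.getElem?_eq_getElem h]; rfl
    have e2 : g2.getD n [] = g2[n] := by rw [List.getD_eq_getElem?_getD, List.getElem?_eq_getElem h2]; rfl
    have hrl : g1[n].length = g2[n].length := by rw [← e1, ← e2]; exact hrow n
    rcases Nat.lt_or_ge m g1[n].length with hm | hm
    · have hm2 : m < g2[n].length := by omega
      rw [List.getElem?_eq_getElem hm, List.getElem?_eq_getElem hm2]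
      have := hcell n m
      unfold pvCell at this
      rw [e1, e2] at this
      simp only [List.getD_eq_getElem?_getD, List.getElem?_eq_getElem hm,
        List.getElem?_eq_getElem hm2] at this
      simpa using this
    · rw [List.getElem?_eq_none (by omega), List.getElem?_eq_none (by omega)]
  · rw [List.getElem?_eq_none (by omega), List.getElem?_eq_none (by omega)]

-- ---------- frame and length lemmas for the scan/step ----------
theorem pvScanA_length (mov : List Int → Bool) (sent : List Int) :
    ∀ (ks : List (Nat × Nat)) (g : List (List (List Int))) (c : Nat × Nat),
      (pvScanA mov sent g c ks).length = g.length := by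
  intro ks
  induction ks with
  | nil => intro g c; rfl
  | cons k ks ih =>
    intro g c
    rw [pvScanA]
    split
    · exact ih g c
    · split
      · rw [length_pvSet, length_pvSet]
      · exact ih g c

theorem pvScanA_row_length (mov : List Int → Bool) (sent : List Int) :
    ∀ (ks : List (Nat × Nat)) (g : List (List (List Int))) (c : Nat × Nat) (i : Nat),
      ((pvScanA mov sent g c ks).getD i []).length = ((g.getD i []).length) := by
  intro ks
  induction ks with
  | nil => intro g c i; rfl
  | cons k ks ih =>
    intro g c i
    rw [pvScanA]
    split
    · exact ih g c i
    · split
      · rw [row_pvSet_length, row_pvSet_length]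
      · exact ih g c i

theorem pvStepA_length (mov : List Int → Bool) (sent : List Int)
    (g : List (List (List Int))) (c : Nat × Nat) (ks : List (Nat × Nat)) :
    (pvStepA mov sent g c ks).length = g.length := by
  rw [pvStepA]
  split
  · rfl
  · exact pvScanA_length mov sent ks g c

theorem pvStepA_row_length (mov : List Int → Bool) (sent : List Int)
    (g : List (List (List Int))) (c : Nat × Nat) (ks : List (Nat × Nat)) (i : Nat) :
    ((pvStepA mov sent g c ks).getD i []).length = (g.getD i []).length := by
  rw [pvStepA]
  split
  · rfl
  · exact pvScanA_row_length mov sent ks g c i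

theorem pvStepA_valid (mov : List Int → Bool) (sent : List Int)
    (g : List (List (List Int))) (c : Nat × Nat) (ks : List (Nat × Nat))
    (hg : pvValid g) : pvValid (pvStepA mov sent g c ks) :=
  ⟨by rw [pvStepA_length]; exact hg.1,
   fun i hi => by rw [pvStepA_row_length]; exact hg.2 i hi⟩

-- a step whose coordinates all lie in column j does not change other columns
theorem pvScanA_cell_ne (mov : List Int → Bool) (sent : List Int) (j : Nat) :
    ∀ (ks : List (Nat × Nat)) (g : List (List (List Int))) (c c' : Nat × Nat),
      (∀ k ∈ ks, k.2 = j) → c.2 = j → c'.2 ≠ j →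
      pvCell (pvScanA mov sent g c ks) c' = pvCell g c' := by
  intro ks
  induction ks with
  | nil => intro g c c' _ _ _; rfl
  | cons k ks ih =>
    intro g c c' hks hc hc'
    rw [pvScanA]
    split
    · exact ih g c c' (fun k' hk' => hks k' (by simp [hk'])) hc hc'
    · split
      · rw [pvCell_set_ne _ _ _ _ (fun h => hc' (by rw [h]; exact hks k (by simp))),
          pvCell_set_ne _ _ _ _ (fun h => hc' (by rw [h]; exact hc))]
      · exact ih g c c' (fun k' hk' => hks k' (by simp [hk'])) hc hc'

theorem pvStepA_cell_ne (mov : List Int → Bool) (sent : List Int) (j : Nat)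
    (g : List (List (List Int))) (c c' : Nat × Nat) (ks : List (Nat × Nat))
    (hks : ∀ k ∈ ks, k.2 = j) (hc : c.2 = j) (hc' : c'.2 ≠ j) :
    pvCell (pvStepA mov sent g c ks) c' = pvCell g c' := by
  rw [pvStepA]
  split
  · rfl
  · exact pvScanA_cell_ne mov sent j ks g c c' hks hc hc'

-- a step in column j computes the same column-j cells on any grid agreeing on column j
theorem pvScanA_congr_col (mov : List Int → Bool) (sent : List Int) (j i : Nat)
    (hj : j < 10) (hi : i < 10) :
    ∀ (ks : List (Nat × Nat)) (g g' : List (List (List Int))),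
      pvValid g → pvValid g' →
      (∀ r : Nat, pvCell g' (r, j) = pvCell g (r, j)) →
      (∀ k ∈ ks, k.2 = j ∧ k.1 < 10 ∧ k.1 ≠ i) →
      ∀ r : Nat, pvCell (pvScanA mov sent g' (i, j) ks) (r, j) =
        pvCell (pvScanA mov sent g (i, j) ks) (r, j) := by
  intro ks
  induction ks with
  | nil => intro g g' _ _ hag _ r; exact hag r
  | cons k ks ih =>
    intro g g' hg hg' hag hks r
    obtain ⟨hkj, hkb, hki⟩ := hks k (by simp)
    have hck : pvCell g' (i, j) = pvCell g (i, j) := hag i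
    have hkk : pvCell g' k = pvCell g k := by
      obtain ⟨k1, k2⟩ := k
      simp only at hkj
      subst hkj
      exact hag k1
    rw [pvScanA, pvScanA, hck, hkk]
    split
    · exact ih g g' hg hg' hag (fun k' hk' => hks k' (by simp [hk'])) r
    · split
      · -- the move happens in both grids; compare the two written cells
        obtain ⟨k1, k2⟩ := k
        simp only at hkj hkb hki
        rw [hkj] at hkk ⊢
        by_cases hrk : r = k1
        · subst hrk
          rw [pvCell_set_self _ _ _ (by rw [length_pvSet]; exact lt_of_lt_of_le hkb hg'.1)
              (by rw [row_pvSet_length]; exact lt_of_lt_of_le hj (hg'.2 r hkb)),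
            pvCell_set_self _ _ _ (by rw [length_pvSet]; exact lt_of_lt_of_le hkb hg.1)
              (by rw [row_pvSet_length]; exact lt_of_lt_of_le hj (hg.2 r hkb))]
        · have hne : ((r : Nat), j) ≠ ((k1 : Nat), j) := by simp [hrk]
          rw [pvCell_set_ne _ _ _ _ hne, pvCell_set_ne _ _ _ _ hne]
          by_cases hrc : r = i
          · subst hrc
            rw [pvCell_set_self _ _ _ (lt_of_lt_of_le hi hg'.1) (lt_of_lt_of_le hj (hg'.2 r hi)),
              pvCell_set_self _ _ _ (lt_of_lt_of_le hi hg.1) (lt_of_lt_of_le hj (hg.2 r hi))]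
          · have hne2 : ((r : Nat), j) ≠ ((i : Nat), j) := by simp [hrc]
            rw [pvCell_set_ne _ _ _ _ hne2, pvCell_set_ne _ _ _ _ hne2]
            exact hag r
      · exact ih g g' hg hg' hag (fun k' hk' => hks k' (by simp [hk'])) r

theorem pvStepA_congr_col (mov : List Int → Bool) (sent : List Int) (j i : Nat)
    (hj : j < 10) (hi : i < 10) (ks : List (Nat × Nat))
    (g g' : List (List (List Int))) (hg : pvValid g) (hg' : pvValid g')
    (hag : ∀ r : Nat, pvCell g' (r, j) = pvCell g (r, j))
    (hks : ∀ k ∈ ks, k.2 = j ∧ k.1 < 10 ∧ k.1 ≠ i) :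
    ∀ r : Nat, pvCell (pvStepA mov sent g' (i, j) ks) (r, j) =
      pvCell (pvStepA mov sent g (i, j) ks) (r, j) := by
  intro r
  rw [pvStepA, pvStepA, hag i]
  split
  · exact hag r
  · exact pvScanA_congr_col mov sent j i hj hi ks g g' hg hg' hag hks r

-- ---------- commutation of steps in different columns ----------
theorem pvStep_col_comm (mov : List Int → Bool) (sent : List Int)
    (i i' j j' : Nat) (ks ks' : List Nat)
    (hi : i < 10) (hi' : i' < 10) (hj : j < 10) (hj' : j' < 10) (hjj : j ≠ j')
    (hks : ∀ k ∈ ks, k < 10 ∧ k ≠ i) (hks' : ∀ k ∈ ks', k < 10 ∧ k ≠ i')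
    (g : List (List (List Int))) (hg : pvValid g) :
    pvStepA mov sent (pvStepA mov sent g (i, j) (ks.map (fun k => (k, j)))) (i', j')
        (ks'.map (fun k => (k, j'))) =
      pvStepA mov sent (pvStepA mov sent g (i', j') (ks'.map (fun k => (k, j')))) (i, j)
        (ks.map (fun k => (k, j))) := by
  have hmapj : ∀ k ∈ ks.map (fun k => (k, j)), (k : Nat × Nat).2 = j := by
    intro k hk; obtain ⟨k0, _, rfl⟩ := List.mem_map.1 hk; rfl
  have hmapj' : ∀ k ∈ ks'.map (fun k => (k, j')), (k : Nat × Nat).2 = j' := by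
    intro k hk; obtain ⟨k0, _, rfl⟩ := List.mem_map.1 hk; rfl
  have hpropj : ∀ k ∈ ks.map (fun k => (k, j)), (k : Nat × Nat).2 = j ∧ k.1 < 10 ∧ k.1 ≠ i := by
    intro k hk; obtain ⟨k0, hk0, rfl⟩ := List.mem_map.1 hk
    exact ⟨rfl, (hks k0 hk0).1, (hks k0 hk0).2⟩
  have hpropj' : ∀ k ∈ ks'.map (fun k => (k, j')), (k : Nat × Nat).2 = j' ∧ k.1 < 10 ∧ k.1 ≠ i' := by
    intro k hk; obtain ⟨k0, hk0, rfl⟩ := List.mem_map.1 hk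
    exact ⟨rfl, (hks' k0 hk0).1, (hks' k0 hk0).2⟩
  have hvj : pvValid (pvStepA mov sent g (i, j) (ks.map (fun k => (k, j)))) :=
    pvStepA_valid mov sent g _ _ hg
  have hvj' : pvValid (pvStepA mov sent g (i', j') (ks'.map (fun k => (k, j')))) :=
    pvStepA_valid mov sent g _ _ hg
  apply pvGrid_ext
  · rw [pvStepA_length, pvStepA_length, pvStepA_length, pvStepA_length]
  · intro n
    rw [pvStepA_row_length, pvStepA_row_length, pvStepA_row_length, pvStepA_row_length]
  · intro r c
    by_cases hcj : c = j
    · rw [hcj]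
      rw [pvStepA_cell_ne mov sent j' _ (i', j') (r, j) _ hmapj' rfl (by simpa using hjj)]
      exact Eq.symm <| pvStepA_congr_col mov sent j i hj hi _ g _ hg hvj'
        (fun r0 => pvStepA_cell_ne mov sent j' _ (i', j') (r0, j) _ hmapj' rfl
          (by simpa using hjj)) hpropj r
    · by_cases hcj' : c = j'
      · rw [hcj']
        rw [show pvCell (pvStepA mov sent (pvStepA mov sent g (i', j') (ks'.map (fun k => (k, j')))) (i, j) (ks.map (fun k => (k, j)))) (r, j') =
            pvCell (pvStepA mov sent g (i', j') (ks'.map (fun k => (k, j')))) (r, j') from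
          pvStepA_cell_ne mov sent j _ (i, j) (r, j') _ hmapj rfl (by simpa using (Ne.symm hjj))]
        exact (pvStepA_congr_col mov sent j' i' hj' hi' _ g _ hg hvj
          (fun r0 => pvStepA_cell_ne mov sent j _ (i, j) (r0, j') _ hmapj rfl
            (by simpa using (Ne.symm hjj))) hpropj' r)
      · rw [pvStepA_cell_ne mov sent j' _ (i', j') (r, c) _ hmapj' rfl (by simpa using hcj'),
          pvStepA_cell_ne mov sent j _ (i, j) (r, c) _ hmapj rfl (by simpa using hcj),
          pvStepA_cell_ne mov sent j _ (i, j) (r, c) _ hmapj rfl (by simpa using hcj),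
          pvStepA_cell_ne mov sent j' _ (i', j') (r, c) _ hmapj' rfl (by simpa using hcj')]

-- ---------- loop interchange: row-major processing = column-major processing ----------
-- (each step of column j only touches column j, so the i- and j-loops commute)
theorem pvIC_validI (mov : List Int → Bool) (sent : List Int) (scan : Nat → List Nat) (j : Nat) :
    ∀ (I : List Nat) (g : List (List (List Int))), pvValid g →
      pvValid (List.foldl (fun g i => pvStepA mov sent g (i, j) ((scan i).map (fun k => (k, j)))) g I) := by
  intro I
  induction I with
  | nil => intro g hg; exact hg
  | cons i I ih => intro g hg; exact ih _ (pvStepA_valid mov sent g _ _ hg)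

theorem pvIC_validJ (mov : List Int → Bool) (sent : List Int) (scan : Nat → List Nat) (i : Nat) :
    ∀ (J : List Nat) (g : List (List (List Int))), pvValid g →
      pvValid (List.foldl (fun g j => pvStepA mov sent g (i, j) ((scan i).map (fun k => (k, j)))) g J) := by
  intro J
  induction J with
  | nil => intro g hg; exact hg
  | cons j J ih => intro g hg; exact ih _ (pvStepA_valid mov sent g _ _ hg)

theorem pvIC_C1 (mov : List Int → Bool) (sent : List Int) (scan : Nat → List Nat)
    (hscan : ∀ i, i < 10 → ∀ k ∈ scan i, k < 10 ∧ k ≠ i) :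
    ∀ (I' : List Nat) (h : List (List (List Int))) (j0 i j' : Nat),
      (∀ x ∈ I', x < 10) → pvValid h → j0 < 10 → i < 10 → j' < 10 → j' ≠ j0 →
      pvStepA mov sent (List.foldl (fun g i' => pvStepA mov sent g (i', j0) ((scan i').map (fun k => (k, j0)))) h I') (i, j') ((scan i).map (fun k => (k, j')))
        = List.foldl (fun g i' => pvStepA mov sent g (i', j0) ((scan i').map (fun k => (k, j0)))) (pvStepA mov sent h (i, j') ((scan i).map (fun k => (k, j')))) I' := by
  intro I'
  induction I' with
  | nil => intro h j0 i j' _ _ _ _ _ _; rfl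
  | cons i0 I'' ih =>
    intro h j0 i j' hb hv hj0 hi hj' hne
    simp only [List.foldl_cons]
    rw [ih _ j0 i j' (fun x hx => hb x (by simp [hx])) (pvStepA_valid mov sent h _ _ hv) hj0 hi hj' hne]
    rw [pvStep_col_comm mov sent i0 i j0 j' (scan i0) (scan i)
      (hb i0 (by simp)) hi hj0 hj' (Ne.symm hne) (hscan i0 (hb i0 (by simp))) (hscan i hi) h hv]

theorem pvIC_C2 (mov : List Int → Bool) (sent : List Int) (scan : Nat → List Nat)
    (hscan : ∀ i, i < 10 → ∀ k ∈ scan i, k < 10 ∧ k ≠ i) :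
    ∀ (J' : List Nat) (h : List (List (List Int))) (I' : List Nat) (j0 i : Nat),
      (∀ x ∈ J', x < 10) → (∀ x ∈ I', x < 10) → pvValid h → j0 < 10 → i < 10 → j0 ∉ J' →
      List.foldl (fun g i' => pvStepA mov sent g (i', j0) ((scan i').map (fun k => (k, j0)))) (List.foldl (fun g j => pvStepA mov sent g (i, j) ((scan i).map (fun k => (k, j)))) h J') I'
        = List.foldl (fun g j => pvStepA mov sent g (i, j) ((scan i).map (fun k => (k, j)))) (List.foldl (fun g i' => pvStepA mov sent g (i', j0) ((scan i').map (fun k => (k, j0)))) h I') J' := by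
  intro J'
  induction J' with
  | nil => intro h I' j0 i _ _ _ _ _ _; rfl
  | cons j' J'' ih =>
    intro h I' j0 i hbJ hbI hv hj0 hi hnm
    simp only [List.foldl_cons]
    rw [ih (pvStepA mov sent h (i, j') ((scan i).map (fun k => (k, j')))) I' j0 i
      (fun x hx => hbJ x (by simp [hx])) hbI (pvStepA_valid mov sent h _ _ hv) hj0 hi
      (fun hmem => hnm (by simp [hmem]))]
    rw [← pvIC_C1 mov sent scan hscan I' h j0 i j' hbI hv hj0 hi (hbJ j' (by simp))
      (fun h' => hnm (h' ▸ (by simp)))]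

theorem pvIC_R (mov : List Int → Bool) (sent : List Int) (scan : Nat → List Nat)
    (hscan : ∀ i, i < 10 → ∀ k ∈ scan i, k < 10 ∧ k ≠ i) :
    ∀ (J : List Nat) (g : List (List (List Int))) (i : Nat) (I' : List Nat),
      (∀ x ∈ J, x < 10) → J.Nodup → pvValid g → i < 10 → (∀ x ∈ I', x < 10) →
      List.foldl (fun g j => List.foldl (fun g i' => pvStepA mov sent g (i', j) ((scan i').map (fun k => (k, j)))) g I') (List.foldl (fun g j => pvStepA mov sent g (i, j) ((scan i).map (fun k => (k, j)))) g J) J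
        = List.foldl (fun g j => List.foldl (fun g i' => pvStepA mov sent g (i', j) ((scan i').map (fun k => (k, j)))) (pvStepA mov sent g (i, j) ((scan i).map (fun k => (k, j)))) I') g J := by
  intro J
  induction J with
  | nil => intro g i I' _ _ _ _ _; rfl
  | cons j0 J' ih =>
    intro g i I' hbJ hnd hv hi hbI
    have hj0 : j0 < 10 := hbJ j0 (by simp)
    have hbJ' : ∀ x ∈ J', x < 10 := fun x hx => hbJ x (by simp [hx])
    have hnd' : J'.Nodup := (List.nodup_cons.1 hnd).2
    have hnm : j0 ∉ J' := (List.nodup_cons.1 hnd).1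
    simp only [List.foldl_cons]
    rw [pvIC_C2 mov sent scan hscan J' (pvStepA mov sent g (i, j0) ((scan i).map (fun k => (k, j0)))) I' j0 i hbJ' hbI (pvStepA_valid mov sent g _ _ hv) hj0 hi hnm]
    exact ih _ i I' hbJ' hnd'
      (pvIC_validI mov sent scan j0 I' _ (pvStepA_valid mov sent g _ _ hv)) hi hbI

theorem pvIC (mov : List Int → Bool) (sent : List Int) (scan : Nat → List Nat)
    (hscan : ∀ i, i < 10 → ∀ k ∈ scan i, k < 10 ∧ k ≠ i) (J : List Nat)
    (hbJ : ∀ x ∈ J, x < 10) (hndJ : J.Nodup) :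
    ∀ (I : List Nat) (g : List (List (List Int))), (∀ x ∈ I, x < 10) → pvValid g →
      List.foldl (fun g i => List.foldl (fun g j => pvStepA mov sent g (i, j) ((scan i).map (fun k => (k, j)))) g J) g I
        = List.foldl (fun g j => List.foldl (fun g i => pvStepA mov sent g (i, j) ((scan i).map (fun k => (k, j)))) g I) g J := by
  intro I
  induction I with
  | nil =>
    intro g _ _
    clear hscan hbJ hndJ
    induction J with
    | nil => rfl
    | cons j J ihJ => simpa using ihJ
  | cons i I' ih =>
    intro g hbI hv
    have hi : i < 10 := hbI i (by simp)
    have hbI' : ∀ x ∈ I', x < 10 := fun x hx => hbI x (by simp [hx])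
    simp only [List.foldl_cons]
    rw [ih _ hbI' (pvIC_validJ mov sent scan i J g hv)]
    exact pvIC_R mov sent scan hscan J g i I' hbJ hndJ hv hi hbI'

-- ---------- bridging the port's nested index loops to per-line processing ----------
theorem pvFold_asc (mov : List Int → Bool) (sent : List Int) (mk : Nat → Nat × Nat) :
    ∀ (n a : Nat), a + n = 10 → ∀ g,
      List.foldl (fun g x => pvStepA mov sent g (mk x) ((List.range' (x+1) (10-(x+1))).map mk)) g (List.range' a n)
        = pvLineStep mov sent g ((List.range' a n).map mk) := by
  intro n
  induction n with
  | zero => intro a _ g; rfl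
  | succ n ih =>
    intro a ha g
    rw [List.range'_succ]
    simp only [List.foldl_cons, List.map_cons, pvLineStep]
    have h1 : 10 - (a + 1) = n := by omega
    rw [h1]
    exact ih (a + 1) (by omega) _

theorem pvFold_desc (mov : List Int → Bool) (sent : List Int) (mk : Nat → Nat × Nat) :
    ∀ (a : Nat) (g : List (List (List Int))),
      List.foldl (fun g x => pvStepA mov sent g (mk x) (((List.range x).reverse).map mk)) g ((List.range a).reverse)
        = pvLineStep mov sent g (((List.range a).reverse).map mk) := by
  intro a
  induction a with
  | zero => intro g; rfl
  | succ a ih =>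
    intro g
    rw [List.range_succ, List.reverse_append]
    simp only [List.reverse_cons, List.reverse_nil, List.nil_append, List.cons_append,
      List.foldl_cons, List.map_cons, pvLineStep]
    exact ih _

-- fold two equal bodies (equal on valid grids, for members) over a list
theorem pvFoldl_congr (F1 F2 : List (List (List Int)) → Nat → List (List (List Int))) :
    ∀ (l : List Nat), (∀ g x, x ∈ l → pvValid g → F1 g x = F2 g x) →
      (∀ g x, pvValid g → pvValid (F1 g x)) →
      ∀ g, pvValid g → l.foldl F1 g = l.foldl F2 g := by
  intro l
  induction l with
  | nil => intro _ _ g _; rfl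
  | cons x l ih =>
    intro heq hP g hg
    simp only [List.foldl_cons]
    rw [← heq g x (by simp) hg]
    exact ih (fun g y hy hg' => heq g y (by simp [hy]) hg') hP _ (hP g x hg)

-- one line of B: write back the single-pass compaction of the extracted line
theorem pvLine_fill (mov : List Int → Bool) (sent : List Int)
    (hm : ∀ c, mov c = true → 0 < c.sum) (hs : sent.sum ≤ 0) (hms : mov sent = false)
    (cs : List (Nat × Nat)) (hnd : cs.Nodup) (hbnd : ∀ c ∈ cs, c.1 < 10 ∧ c.2 < 10)
    (g : List (List (List Int))) (hg : pvValid g) :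
    pvLineStep mov sent g cs =
      pvWriteCells g (cs.zip (pvFill mov sent ((cs.map (pvCell g)).filter mov) (cs.map (pvCell g)))) := by
  rw [pvLineStep_eq mov sent cs g hg hnd hbnd,
    pvProc_eq_fill mov sent hm hs hms (cs.map (pvCell g)).length _ le_rfl]

theorem pvMovF_sum (c : List Int) (h : decide (0 < c.sum) = true) : 0 < c.sum := by
  simpa using h

theorem pvMov1_sum (c : List Int) (h : decide (c.sum = 1) = true) : 0 < c.sum := by
  have := of_decide_eq_true h; omega

theorem pvSentF : (([0,0,0] : List Int)).sum ≤ 0 := by decide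

theorem pvRowCoords_nodup (t : Nat) : ((List.range 10).map (fun k => ((t, k) : Nat × Nat))).Nodup :=
  (List.nodup_range).map (fun a b h => by simpa using congrArg Prod.snd h)

theorem pvColCoords_nodup (t : Nat) : ((List.range 10).map (fun k => ((k, t) : Nat × Nat))).Nodup :=
  (List.nodup_range).map (fun a b h => by simpa using congrArg Prod.fst h)

theorem pvRowCoordsR_nodup (t : Nat) : (((List.range 10).reverse).map (fun k => ((t, k) : Nat × Nat))).Nodup :=
  (List.nodup_reverse.2 List.nodup_range).map (fun a b h => by simpa using congrArg Prod.snd h)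

theorem pvColCoordsR_nodup (t : Nat) : (((List.range 10).reverse).map (fun k => ((k, t) : Nat × Nat))).Nodup :=
  (List.nodup_reverse.2 List.nodup_range).map (fun a b h => by simpa using congrArg Prod.fst h)

theorem pvRowCoords_bnd (t : Nat) (ht : t < 10) :
    ∀ c ∈ (List.range 10).map (fun k => ((t, k) : Nat × Nat)), c.1 < 10 ∧ c.2 < 10 := by
  intro c hc
  obtain ⟨k, hk, rfl⟩ := List.mem_map.1 hc
  exact ⟨ht, by simpa using hk⟩

theorem pvColCoords_bnd (t : Nat) (ht : t < 10) :
    ∀ c ∈ (List.range 10).map (fun k => ((k, t) : Nat × Nat)), c.1 < 10 ∧ c.2 < 10 := by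
  intro c hc
  obtain ⟨k, hk, rfl⟩ := List.mem_map.1 hc
  exact ⟨by simpa using hk, ht⟩

theorem pvRowCoordsR_bnd (t : Nat) (ht : t < 10) :
    ∀ c ∈ ((List.range 10).reverse).map (fun k => ((t, k) : Nat × Nat)), c.1 < 10 ∧ c.2 < 10 := by
  intro c hc
  obtain ⟨k, hk, rfl⟩ := List.mem_map.1 hc
  exact ⟨ht, by simpa using hk⟩

theorem pvColCoordsR_bnd (t : Nat) (ht : t < 10) :
    ∀ c ∈ ((List.range 10).reverse).map (fun k => ((k, t) : Nat × Nat)), c.1 < 10 ∧ c.2 < 10 := by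
  intro c hc
  obtain ⟨k, hk, rfl⟩ := List.mem_map.1 hc
  exact ⟨by simpa using hk, ht⟩

theorem pvPre_valid (box : List (List (List Int))) (h1 : 10 ≤ box.length)
    (h2 : ∀ r ∈ box.take 10, 10 ≤ r.length) : pvValid box := by
  refine ⟨h1, fun i hi => ?_⟩
  have hlt : i < box.length := by omega
  have e : box.getD i [] = box[i] := by
    rw [List.getD_eq_getElem?_getD, List.getElem?_eq_getElem hlt]; rfl
  rw [e]
  refine h2 box[i] ?_
  have : (box.take 10)[i]'(by simp; omega) = box[i] := List.getElem_take
  rw [← this]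
  exact List.getElem_mem _

-- ---------- the four directions ----------
theorem pvDir_L (box : List (List (List Int))) (hv : pvValid box) :
    List.foldl (fun g i => List.foldl (fun g j => pvStepA (fun c => decide (c.sum = 1)) [0,0,0] g (i, j) ((List.range' (j+1) (10-(j+1))).map (fun k => (i, k)))) g (List.range 10)) box (List.range 10)
      = List.foldl (fun g t => pvWriteCells g (((List.range 10).map (fun k => ((t, k) : Nat × Nat))).zip (pvFill (fun c => decide (c.sum = 1)) [0,0,0] (List.filter (fun c => decide (c.sum = 1)) (List.map (pvCell g) ((List.range 10).map (fun k => (t, k))))) (List.map (pvCell g) ((List.range 10).map (fun k => (t, k))))))) box (List.range 10) := by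
  have hbody : (fun (g : List (List (List Int))) (i : Nat) => List.foldl (fun g j => pvStepA (fun c => decide (c.sum = 1)) [0,0,0] g (i, j) ((List.range' (j+1) (10-(j+1))).map (fun k => (i, k)))) g (List.range 10))
      = fun g i => pvLineStep (fun c => decide (c.sum = 1)) [0,0,0] g ((List.range 10).map (fun k => (i, k))) := by
    funext g i
    rw [List.range_eq_range']
    exact pvFold_asc _ _ (fun k => (i, k)) 10 0 rfl g
  rw [hbody]
  apply pvFoldl_congr _ _ (List.range 10) _ (fun g t hg => pvLineStep_valid _ _ _ g hg) box hv
  intro g t ht hg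
  exact pvLine_fill _ _ pvMov1_sum pvSentF (by decide) _ (pvRowCoords_nodup t)
    (pvRowCoords_bnd t (by simpa using ht)) g hg

theorem pvDir_R (box : List (List (List Int))) (hv : pvValid box) :
    List.foldl (fun g i => List.foldl (fun g j => pvStepA (fun c => decide (c.sum = 1)) [0,0,0] g (i, j) (((List.range j).reverse).map (fun k => (i, k)))) g ((List.range 10).reverse)) box (List.range 10)
      = List.foldl (fun g t => pvWriteCells g ((((List.range 10).reverse).map (fun k => ((t, k) : Nat × Nat))).zip (pvFill (fun c => decide (c.sum = 1)) [0,0,0] (List.filter (fun c => decide (c.sum = 1)) (List.map (pvCell g) (((List.range 10).reverse).map (fun k => (t, k))))) (List.map (pvCell g) (((List.range 10).reverse).map (fun k => (t, k))))))) box (List.range 10) := by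
  have hbody : (fun (g : List (List (List Int))) (i : Nat) => List.foldl (fun g j => pvStepA (fun c => decide (c.sum = 1)) [0,0,0] g (i, j) (((List.range j).reverse).map (fun k => (i, k)))) g ((List.range 10).reverse))
      = fun g i => pvLineStep (fun c => decide (c.sum = 1)) [0,0,0] g (((List.range 10).reverse).map (fun k => (i, k))) := by
    funext g i
    exact pvFold_desc _ _ (fun k => (i, k)) 10 g
  rw [hbody]
  apply pvFoldl_congr _ _ (List.range 10) _ (fun g t hg => pvLineStep_valid _ _ _ g hg) box hv
  intro g t ht hg
  exact pvLine_fill _ _ pvMov1_sum pvSentF (by decide) _ (pvRowCoordsR_nodup t)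
    (pvRowCoordsR_bnd t (by simpa using ht)) g hg

theorem pvDir_F (box : List (List (List Int))) (hv : pvValid box) :
    List.foldl (fun g i => List.foldl (fun g j => pvStepA (fun c => decide (0 < c.sum)) [0,0,0] g (i, j) ((List.range' (i+1) (10-(i+1))).map (fun k => (k, j)))) g (List.range 10)) box (List.range 10)
      = List.foldl (fun g t => pvWriteCells g (((List.range 10).map (fun k => ((k, t) : Nat × Nat))).zip (pvFill (fun c => decide (0 < c.sum)) [0,0,0] (List.filter (fun c => decide (0 < c.sum)) (List.map (pvCell g) ((List.range 10).map (fun k => (k, t))))) (List.map (pvCell g) ((List.range 10).map (fun k => (k, t))))))) box (List.range 10) := by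
  rw [pvIC (fun c => decide (0 < c.sum)) [0,0,0] (fun i => List.range' (i+1) (10-(i+1)))
    (fun i _ k hk => by
      have := List.mem_range'_1.1 hk
      exact ⟨by omega, by omega⟩)
    (List.range 10) (fun x hx => by simpa using hx) List.nodup_range
    (List.range 10) box (fun x hx => by simpa using hx) hv]
  have hbody : (fun (g : List (List (List Int))) (j : Nat) => List.foldl (fun g i => pvStepA (fun c => decide (0 < c.sum)) [0,0,0] g (i, j) ((List.range' (i+1) (10-(i+1))).map (fun k => (k, j)))) g (List.range 10))
      = fun g j => pvLineStep (fun c => decide (0 < c.sum)) [0,0,0] g ((List.range 10).map (fun k => (k, j))) := by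
    funext g j
    rw [List.range_eq_range']
    exact pvFold_asc _ _ (fun k => (k, j)) 10 0 rfl g
  rw [hbody]
  apply pvFoldl_congr _ _ (List.range 10) _ (fun g t hg => pvLineStep_valid _ _ _ g hg) box hv
  intro g t ht hg
  exact pvLine_fill _ _ pvMovF_sum pvSentF (by decide) _ (pvColCoords_nodup t)
    (pvColCoords_bnd t (by simpa using ht)) g hg

theorem pvDir_B (box : List (List (List Int))) (hv : pvValid box) :
    List.foldl (fun g i => List.foldl (fun g j => pvStepA (fun c => decide (c.sum = 1)) [0,0,0] g (i, j) (((List.range i).reverse).map (fun k => (k, j)))) g (List.range 10)) box ((List.range 10).reverse)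
      = List.foldl (fun g t => pvWriteCells g ((((List.range 10).reverse).map (fun k => ((k, t) : Nat × Nat))).zip (pvFill (fun c => decide (c.sum = 1)) [0,0,0] (List.filter (fun c => decide (c.sum = 1)) (List.map (pvCell g) (((List.range 10).reverse).map (fun k => (k, t))))) (List.map (pvCell g) (((List.range 10).reverse).map (fun k => (k, t))))))) box (List.range 10) := by
  rw [pvIC (fun c => decide (c.sum = 1)) [0,0,0] (fun i => (List.range i).reverse)
    (fun i hi k hk => by
      have : k < i := by simpa using hk
      exact ⟨by omega, by omega⟩)
    (List.range 10) (fun x hx => by simpa using hx) List.nodup_range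
    ((List.range 10).reverse) box (fun x hx => by simpa using hx) hv]
  have hbody : (fun (g : List (List (List Int))) (j : Nat) => List.foldl (fun g i => pvStepA (fun c => decide (c.sum = 1)) [0,0,0] g (i, j) (((List.range i).reverse).map (fun k => (k, j)))) g ((List.range 10).reverse))
      = fun g j => pvLineStep (fun c => decide (c.sum = 1)) [0,0,0] g (((List.range 10).reverse).map (fun k => (k, j))) := by
    funext g j
    exact pvFold_desc _ _ (fun k => (k, j)) 10 g
  rw [hbody]
  apply pvFoldl_congr _ _ (List.range 10) _ (fun g t hg => pvLineStep_valid _ _ _ g hg) box hv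
  intro g t ht hg
  exact pvLine_fill _ _ pvMov1_sum pvSentF (by decide) _ (pvColCoordsR_nodup t)
    (pvColCoordsR_bnd t (by simpa using ht)) g hg

-- ===== VERDICT (by name: the statement is the Claim_ definition above) =====
theorem tilt_box_spec : Claim_equal_tilt_box := by
  intro dir box _ hpre
  unfold Spec_tilt_box
  by_cases hF : dir = "F"
  · subst hF
    have hv : pvValid box := by
      obtain ⟨h1, h2⟩ := hpre (Or.inl rfl)
      exact pvPre_valid box h1 h2
    simp only [tilt_box, tilt_box_alt, pvLineCoords, String.reduceEq, reduceIte,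
      decide_false, decide_true, or_self, or_false, false_or, or_true, true_or,
      if_true, if_false, Bool.false_eq_true, Bool.true_eq_false]
    exact pvDir_F box hv
  · by_cases hL : dir = "L"
    · subst hL
      have hv : pvValid box := by
        obtain ⟨h1, h2⟩ := hpre (Or.inr (Or.inl rfl))
        exact pvPre_valid box h1 h2
      simp only [tilt_box, tilt_box_alt, pvLineCoords, String.reduceEq, reduceIte,
        decide_false, decide_true, or_self, or_false, false_or, or_true, true_or,
        if_true, if_false, Bool.false_eq_true, Bool.true_eq_false]
      exact pvDir_L box hv
    · by_cases hB : dir = "B"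
      · subst hB
        have hv : pvValid box := by
          obtain ⟨h1, h2⟩ := hpre (Or.inr (Or.inr (Or.inl rfl)))
          exact pvPre_valid box h1 h2
        simp only [tilt_box, tilt_box_alt, pvLineCoords, String.reduceEq, reduceIte,
          decide_false, decide_true, or_self, or_false, false_or, or_true, true_or,
          if_true, if_false, Bool.false_eq_true, Bool.true_eq_false]
        exact pvDir_B box hv
      · by_cases hR : dir = "R"
        · subst hR
          have hv : pvValid box := by
            obtain ⟨h1, h2⟩ := hpre (Or.inr (Or.inr (Or.inr rfl)))
            exact pvPre_valid box h1 h2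
          simp only [tilt_box, tilt_box_alt, pvLineCoords, String.reduceEq, reduceIte,
            decide_false, decide_true, or_self, or_false, false_or, or_true, true_or,
            if_true, if_false, Bool.false_eq_true, Bool.true_eq_false]
          exact pvDir_R box hv
        · rw [tilt_box, if_neg hF, if_neg hL, if_neg hB, if_neg hR,
            tilt_box_alt, if_neg (by simp [hF, hL, hB, hR])]
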